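-- pv_equiv track=rewrite | github.com/peter0749/aiComposer_multiple_instruments | predict_ending/train_dir.py | purge
-- ===== SOURCE A (Python) =====
-- def purge(x):
--     y = [x[-1]] #pick last element
--     i = len(x)-2 # iterate over all set in reversed order
--     while i>=0:
--         while i>=0 and x[i][1] == y[-1][1] and x[i][2] == y[-1][2]: ## overlapped, find next different note
--             i -= 1
--         if i>=0: ## founded
--             y.append(x[i])
--         i -= 1
--     return list(reversed(y))
-- ===== SOURCE B (Python) =====
-- def purge(x):
--     prev = x[0]
--     res = []
--     for cur in x[1:]:
--         if (cur[1], cur[2]) != (prev[1], prev[2]):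
--             res.append(prev)
--         prev = cur
--     res.append(prev)
--     return res
-- ===== Notes on version B (the rewrite author's own statement) =====
-- stated objective: simpler
-- what changed: Replaces A's reverse two-pointer loop (seed last element, skip backwards over runs of equal (field1,field2) keys, append run representatives, then reverse the accumulator) with a single forward pass that compares each element to its predecessor and emits the predecessor whenever the key changes, emitting the final predecessor at the end.
import Mathlib
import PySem

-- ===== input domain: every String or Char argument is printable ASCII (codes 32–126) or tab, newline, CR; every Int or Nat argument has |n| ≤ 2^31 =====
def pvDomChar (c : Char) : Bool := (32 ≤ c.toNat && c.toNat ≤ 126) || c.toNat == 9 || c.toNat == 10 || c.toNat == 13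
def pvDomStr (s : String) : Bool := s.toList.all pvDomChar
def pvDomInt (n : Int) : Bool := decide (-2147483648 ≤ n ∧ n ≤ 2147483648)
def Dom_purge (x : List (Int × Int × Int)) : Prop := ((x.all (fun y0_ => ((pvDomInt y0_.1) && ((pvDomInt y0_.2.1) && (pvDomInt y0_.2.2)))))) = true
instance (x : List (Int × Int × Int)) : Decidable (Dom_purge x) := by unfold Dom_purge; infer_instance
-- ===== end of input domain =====

-- B replaces A's reverse two-pointer run-skipping loop by a forward single pass comparing
-- each element with its predecessor (objective: simpler). Equivalence on nonempty lists.

-- ===== PORT A =====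
-- inner 'while i>=0 and x[i][1]==y[-1][1] and x[i][2]==y[-1][2]: i -= 1'
-- (state n = i+1, so 'i >= 0' is 'n > 0'; x[i] is in range whenever read, so getD never hits its default)
def purgeSkip (x : List (Int × Int × Int)) (last : Int × Int × Int) : Nat → Nat
  | 0 => 0
  | m + 1 =>
    if (x.getD m (0,0,0)).2.1 = last.2.1 ∧ (x.getD m (0,0,0)).2.2 = last.2.2 then
      purgeSkip x last m
    else m + 1

theorem purgeSkip_le (x : List (Int × Int × Int)) (last : Int × Int × Int) :
    ∀ n, purgeSkip x last n ≤ n := by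
  intro n
  induction n with
  | zero => simp [purgeSkip]
  | succ m ih => simp only [purgeSkip]; split <;> omega

-- outer 'while i>=0' loop; y is kept newest-first so 'list(reversed(y))' is y itself
def purgeLoop (x : List (Int × Int × Int)) : Nat → List (Int × Int × Int) → List (Int × Int × Int)
  | 0, y => y
  | m + 1, y =>
    let n' := purgeSkip x (y.headD (0,0,0)) (m + 1)
    if _h : n' = 0 then y
    else purgeLoop x (n' - 1) (x.getD (n' - 1) (0,0,0) :: y)
termination_by n => n
decreasing_by
  have := purgeSkip_le x (y.headD (0,0,0)) (m + 1)
  omega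

def purge (x : List (Int × Int × Int)) : List (Int × Int × Int) :=
  match PySem.List.pyGet? x (-1) with      -- x[-1]; none = IndexError, excluded by Pre_
  | none => []
  | some lastv => purgeLoop x (x.length - 1) [lastv]

-- ===== PORT B =====
-- 'for cur in x[1:]: if key differs append prev; prev = cur', then append the final prev
def purgeFwd (prev : Int × Int × Int) : List (Int × Int × Int) → List (Int × Int × Int)
  | [] => [prev]
  | cur :: rest =>
    if cur.2.1 = prev.2.1 ∧ cur.2.2 = prev.2.2 then purgeFwd cur rest
    else prev :: purgeFwd cur rest

def purge_alt (x : List (Int × Int × Int)) : List (Int × Int × Int) :=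
  match x with
  | [] => []          -- x[0] raises IndexError in B too; excluded by Pre_
  | p :: rest => purgeFwd p rest

-- ===== PRECONDITION & SPEC =====
-- Pre_ excludes only the empty list, on which both A (x[-1]) and B (x[0]) raise IndexError.
def Pre_purge (x : List (Int × Int × Int)) : Prop := x ≠ []
instance (x : List (Int × Int × Int)) : Decidable (Pre_purge x) := by unfold Pre_purge; infer_instance
def pvWitness_purge : (List (Int × Int × Int)) := [(1, 2, 3), (4, 2, 3), (5, 6, 7)]

def Spec_purge (x : List (Int × Int × Int)) (out : List (Int × Int × Int)) : Prop := out = purge_alt x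
instance (x : List (Int × Int × Int)) (out : List (Int × Int × Int)) : Decidable (Spec_purge x out) := by unfold Spec_purge; infer_instance

-- ===== CLAIM (what is proved, stated in full; the proofs are below) =====
def Claim_equal_purge : Prop := ∀ (x : List (Int × Int × Int)), Dom_purge x → Pre_purge x → Spec_purge x (purge x)

-- ===== LEMMAS AND PROOFS =====

-- list view of A's reverse walk: r is the reversed unread prefix
def purgeGA : List (Int × Int × Int) → List (Int × Int × Int) → List (Int × Int × Int)
  | r, y =>
    match h : r.dropWhile (fun e => decide (e.2.1 = (y.headD (0,0,0)).2.1 ∧ e.2.2 = (y.headD (0,0,0)).2.2)) with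
    | [] => y
    | hd :: t => purgeGA t (hd :: y)
termination_by r _ => r.length
decreasing_by
  have h1 : (r.dropWhile (fun e => decide (e.2.1 = (y.headD (0,0,0)).2.1 ∧ e.2.2 = (y.headD (0,0,0)).2.2))).length ≤ r.length :=
    List.length_dropWhile_le _ _
  rw [h] at h1; simp at h1 ⊢; omega

theorem purgeSkip_dropWhile (x : List (Int × Int × Int)) (last : Int × Int × Int) :
    ∀ n, n ≤ x.length →
      (x.take n).reverse.dropWhile
          (fun e => decide (e.2.1 = last.2.1 ∧ e.2.2 = last.2.2))
        = (x.take (purgeSkip x last n)).reverse := by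
  intro n
  induction n with
  | zero => intro _; simp [purgeSkip]
  | succ m ih =>
    intro hn
    have hm : m < x.length := by omega
    have htake : x.take (m + 1) = x.take m ++ [x[m]] := by
      rw [List.take_add_one, List.getElem?_eq_getElem hm]; rfl
    have hget : x.getD m (0,0,0) = x[m] := by
      simp [List.getD, List.getElem?_eq_getElem hm]
    have hs : purgeSkip x last (m + 1)
        = if x[m].2.1 = last.2.1 ∧ x[m].2.2 = last.2.2 then purgeSkip x last m else m + 1 := by
      simp only [purgeSkip, hget]
    rw [htake, hs]
    simp only [List.reverse_append, List.reverse_singleton, List.singleton_append,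
      List.dropWhile_cons, decide_eq_true_eq]
    by_cases hc : x[m].2.1 = last.2.1 ∧ x[m].2.2 = last.2.2
    · rw [if_pos hc, if_pos hc]
      exact ih (by omega)
    · rw [if_neg hc, if_neg hc]
      rw [htake, List.reverse_append, List.reverse_singleton, List.singleton_append]

theorem purgeGA_drop_nil (r y : List (Int × Int × Int))
    (h : r.dropWhile (fun e => decide (e.2.1 = (y.headD (0,0,0)).2.1 ∧ e.2.2 = (y.headD (0,0,0)).2.2)) = []) :
    purgeGA r y = y := by
  rw [purgeGA]
  split
  · rfl
  · rename_i hd t heq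
    rw [h] at heq; cases heq

theorem purgeGA_drop_cons (r y : List (Int × Int × Int)) (hd : Int × Int × Int) (t : List (Int × Int × Int))
    (h : r.dropWhile (fun e => decide (e.2.1 = (y.headD (0,0,0)).2.1 ∧ e.2.2 = (y.headD (0,0,0)).2.2)) = hd :: t) :
    purgeGA r y = purgeGA t (hd :: y) := by
  rw [purgeGA]
  split
  · rename_i heq
    rw [h] at heq; cases heq
  · rename_i hd' t' heq
    rw [h] at heq
    injection heq with h1 h2
    subst h1; subst h2; rfl

theorem purgeLoop_eq_gA (x : List (Int × Int × Int)) :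
    ∀ n y, n ≤ x.length → purgeLoop x n y = purgeGA ((x.take n).reverse) y := by
  intro n
  induction n using Nat.strong_induction_on with
  | _ n ih =>
    intro y hn
    match n with
    | 0 => simp [purgeLoop, purgeGA]
    | m + 1 =>
      rw [purgeLoop]
      have hdw := purgeSkip_dropWhile x (y.headD (0,0,0)) (m + 1) hn
      set n' := purgeSkip x (y.headD (0,0,0)) (m + 1) with hn'
      have hle : n' ≤ m + 1 := purgeSkip_le x (y.headD (0,0,0)) (m + 1)
      by_cases h0 : n' = 0
      · rw [dif_pos h0]
        rw [h0, List.take_zero, List.reverse_nil] at hdw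
        rw [purgeGA_drop_nil _ _ hdw]
      · obtain ⟨k, hk'⟩ : ∃ k, n' = k + 1 := ⟨n' - 1, by omega⟩
        have hkx : k < x.length := by omega
        have htake : x.take n' = x.take k ++ [x[k]] := by
          rw [hk', List.take_add_one, List.getElem?_eq_getElem hkx]; rfl
        have hget : x.getD (n' - 1) (0,0,0) = x[k] := by
          rw [hk']
          simp [List.getD, List.getElem?_eq_getElem hkx]
        have hdw2 : ((x.take (m+1)).reverse).dropWhile
            (fun e => decide (e.2.1 = (y.headD (0,0,0)).2.1 ∧ e.2.2 = (y.headD (0,0,0)).2.2))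
            = x[k] :: (x.take k).reverse := by
          rw [hdw, htake]; simp
        rw [dif_neg h0, hget, hk']
        simp only [Nat.add_sub_cancel]
        rw [purgeGA_drop_cons _ _ _ _ hdw2]
        exact ih k (by omega) _ (by omega)

-- one-step unfolding of purgeGA
theorem purgeGA_cons (e : Int × Int × Int) (r y : List (Int × Int × Int)) :
    purgeGA (e :: r) y =
      if e.2.1 = (y.headD (0,0,0)).2.1 ∧ e.2.2 = (y.headD (0,0,0)).2.2 then
        purgeGA r y
      else purgeGA r (e :: y) := by
  by_cases hc : e.2.1 = (y.headD (0,0,0)).2.1 ∧ e.2.2 = (y.headD (0,0,0)).2.2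
  · rw [if_pos hc]
    cases hdrop : r.dropWhile (fun e => decide (e.2.1 = (y.headD (0,0,0)).2.1 ∧ e.2.2 = (y.headD (0,0,0)).2.2)) with
    | nil =>
      have h2 : (e :: r).dropWhile (fun e => decide (e.2.1 = (y.headD (0,0,0)).2.1 ∧ e.2.2 = (y.headD (0,0,0)).2.2)) = [] := by
        rw [List.dropWhile_cons, if_pos (by simpa using hc), hdrop]
      rw [purgeGA_drop_nil _ _ h2, purgeGA_drop_nil _ _ hdrop]
    | cons hd t =>
      have h2 : (e :: r).dropWhile (fun e => decide (e.2.1 = (y.headD (0,0,0)).2.1 ∧ e.2.2 = (y.headD (0,0,0)).2.2)) = hd :: t := by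
        rw [List.dropWhile_cons, if_pos (by simpa using hc), hdrop]
      rw [purgeGA_drop_cons _ _ _ _ h2, purgeGA_drop_cons _ _ _ _ hdrop]
  · rw [if_neg hc]
    have h2 : (e :: r).dropWhile (fun e => decide (e.2.1 = (y.headD (0,0,0)).2.1 ∧ e.2.2 = (y.headD (0,0,0)).2.2)) = e :: r := by
      rw [List.dropWhile_cons, if_neg (by simpa using hc)]
    rw [purgeGA_drop_cons _ _ _ _ h2]

-- B drops an element whose key equals its successor's
theorem purgeFwd_dup (e lastv : Int × Int × Int)
    (hk : e.2.1 = lastv.2.1 ∧ e.2.2 = lastv.2.2) :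
    ∀ (l : List (Int × Int × Int)) (prev : Int × Int × Int),
      purgeFwd prev (l ++ [e, lastv]) = purgeFwd prev (l ++ [lastv]) := by
  intro l
  induction l with
  | nil =>
    intro prev
    have h1 : lastv.2.1 = e.2.1 ∧ lastv.2.2 = e.2.2 := ⟨hk.1.symm, hk.2.symm⟩
    simp only [List.nil_append, purgeFwd]
    rw [if_pos h1]
    by_cases hp : e.2.1 = prev.2.1 ∧ e.2.2 = prev.2.2
    · rw [if_pos hp, if_pos ⟨hk.1.symm.trans hp.1, hk.2.symm.trans hp.2⟩]
    · rw [if_neg hp, if_neg (fun h => hp ⟨hk.1.trans h.1, hk.2.trans h.2⟩)]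
  | cons a t ih =>
    intro prev
    simp only [List.cons_append, purgeFwd]
    rw [ih a]

-- B keeps an element whose key differs from its successor's
theorem purgeFwd_keep (e lastv : Int × Int × Int)
    (hk : ¬ (lastv.2.1 = e.2.1 ∧ lastv.2.2 = e.2.2)) :
    ∀ (l : List (Int × Int × Int)) (prev : Int × Int × Int),
      purgeFwd prev (l ++ [e, lastv]) = purgeFwd prev (l ++ [e]) ++ [lastv] := by
  intro l
  induction l with
  | nil =>
    intro prev
    simp only [List.nil_append, purgeFwd]
    rw [if_neg hk]
    split_ifs <;> rfl
  | cons a t ih =>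
    intro prev
    simp only [List.cons_append, purgeFwd]
    rw [ih a]
    split <;> rfl

theorem purge_alt_dup (e lastv : Int × Int × Int)
    (hk : e.2.1 = lastv.2.1 ∧ e.2.2 = lastv.2.2) (l : List (Int × Int × Int)) :
    purge_alt (l ++ [e, lastv]) = purge_alt (l ++ [lastv]) := by
  cases l with
  | nil =>
    simp only [List.nil_append, purge_alt, purgeFwd]
    rw [if_pos ⟨hk.1.symm, hk.2.symm⟩]
  | cons p t =>
    simp only [List.cons_append, purge_alt]
    exact purgeFwd_dup e lastv hk t p

theorem purge_alt_keep (e lastv : Int × Int × Int)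
    (hk : ¬ (lastv.2.1 = e.2.1 ∧ lastv.2.2 = e.2.2)) (l : List (Int × Int × Int)) :
    purge_alt (l ++ [e, lastv]) = purge_alt (l ++ [e]) ++ [lastv] := by
  cases l with
  | nil =>
    simp only [List.nil_append, purge_alt, purgeFwd]
    rw [if_neg hk]
    rfl
  | cons p t =>
    simp only [List.cons_append, purge_alt]
    exact purgeFwd_keep e lastv hk t p

-- bridge: A's reverse walk over l with seed last :: y equals B's forward pass over l ++ [last], ++ y
theorem purgeGA_eq_alt :
    ∀ (l : List (Int × Int × Int)) (lastv : Int × Int × Int) (y : List (Int × Int × Int)),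
      purgeGA l.reverse (lastv :: y) = purge_alt (l ++ [lastv]) ++ y := by
  intro l
  induction l using List.reverseRecOn with
  | nil =>
    intro lastv y
    rw [purgeGA]
    simp [purge_alt, purgeFwd]
  | append_singleton l' e ih =>
    intro lastv y
    rw [List.reverse_append, List.reverse_singleton, List.singleton_append, purgeGA_cons]
    simp only [List.headD_cons, List.append_assoc, List.singleton_append]
    by_cases hc : e.2.1 = lastv.2.1 ∧ e.2.2 = lastv.2.2
    · rw [if_pos hc, ih lastv y, purge_alt_dup e lastv hc l']
    · rw [if_neg hc, ih e (lastv :: y),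
        purge_alt_keep e lastv (fun h => hc ⟨h.1.symm, h.2.symm⟩) l']
      simp

-- ===== VERDICT (by name: the statement is the Claim_ definition above) =====
theorem purge_spec : Claim_equal_purge := by
  intro x _ hpre
  unfold Spec_purge
  have hx : x ≠ [] := hpre
  have hlast : PySem.List.pyGet? x (-1) = some (x.getLast hx) := by
    rw [PySem.List.pyGet?_neg_one, List.getLast?_eq_some_getLast hx]
  have hpurge : purge x = purgeLoop x (x.length - 1) [x.getLast hx] := by
    unfold purge
    rw [hlast]
  rw [hpurge, purgeLoop_eq_gA x (x.length - 1) [x.getLast hx] (by omega)]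
  have htake : x.take (x.length - 1) = x.dropLast := by
    rw [List.dropLast_eq_take]
  rw [htake, purgeGA_eq_alt x.dropLast (x.getLast hx) [],
    List.dropLast_append_getLast hx, List.append_nil]
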